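-- pv_equiv track=rewrite | github.com/lshwa/Algorithm | 백준/Silver/4659. 비밀번호 발음하기/비밀번호 발음하기.py | accept_condition
-- ===== SOURCE A (Python) =====
-- def accept_condition(password):
--     vowels = 'aeiou'
--     has_vowel = False
--     vowel_cnt = 0           # 모음 갯수
--     consonant_cnt = 0       # 자음 갯수
--
--     prev_char = ''
--
--     for i, ch in enumerate(password):
--         if ch in vowels:
--             has_vowel = True
--             vowel_cnt += 1
--             consonant_cnt = 0
--
--         else:
--             consonant_cnt += 1
--             vowel_cnt = 0
--
--         if vowel_cnt >= 3 or consonant_cnt >= 3: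
--             return False
--
--         if i >= 1 and ch == prev_char:
--             if ch not in ['e', 'o']:
--                 return False
--
--         prev_char = ch
--
--     return has_vowel
-- ===== SOURCE B (Python) =====
-- def accept_condition(password):
--     vowels = 'aeiou'
--     cls = [c in vowels for c in password]
--     if any(a == b == c for a, b, c in zip(cls, cls[1:], cls[2:])):
--         return False
--     if any(x == y and x not in 'eo' for x, y in zip(password, password[1:])):
--         return False
--     return any(cls)
-- ===== Notes on version B (the rewrite author's own statement) =====
-- stated objective: simpler
-- what changed: Replaces the fused stateful loop (vowel/consonant run counters, prev-char tracking, early returns) by three independent linear scans: a triple scan for three same-class letters in a row, a pair scan for a repeated letter other than 'e'/'o', and an any() for the vowel flag.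
import Mathlib
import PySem

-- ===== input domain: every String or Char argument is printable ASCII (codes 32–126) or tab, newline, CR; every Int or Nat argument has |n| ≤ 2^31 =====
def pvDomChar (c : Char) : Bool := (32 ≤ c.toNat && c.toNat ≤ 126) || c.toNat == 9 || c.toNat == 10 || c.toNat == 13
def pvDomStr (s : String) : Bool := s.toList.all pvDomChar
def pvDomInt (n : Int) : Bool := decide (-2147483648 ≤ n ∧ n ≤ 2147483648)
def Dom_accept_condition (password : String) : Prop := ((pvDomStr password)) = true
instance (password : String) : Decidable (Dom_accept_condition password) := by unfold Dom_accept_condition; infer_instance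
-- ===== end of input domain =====

-- B replaces A's fused stateful loop by three independent linear scans (same cost): a simpler decomposition.


-- ===== PORT A =====
-- 'ch in vowels' where vowels = 'aeiou'
def isVowel (c : Char) : Bool := "aeiou".toList.contains c

-- A's loop, step for step: state = (has_vowel, vowel_cnt, consonant_cnt, prev_char).
-- Python's prev_char starts as '' and ch == '' is always False there, so we carry
-- Option Char (none before the first iteration); this also subsumes the i >= 1 guard.
def loopA : List Char → Bool → Nat → Nat → Option Char → Bool
  | [], hv, _, _, _ => hv
  | ch :: rest, hv, v, c, prev =>
    let hv' := if isVowel ch then true else hv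
    let v'  := if isVowel ch then v + 1 else 0
    let c'  := if isVowel ch then 0 else c + 1
    if v' ≥ 3 ∨ c' ≥ 3 then false
    else if prev = some ch ∧ ¬ (['e', 'o'].contains ch = true) then false
    else loopA rest hv' v' c' (some ch)

def accept_condition (password : String) : Bool :=
  loopA password.toList false 0 0 none

-- ===== PORT B =====
-- any(a == b == c for a, b, c in zip(cls, cls[1:], cls[2:]))
def tripleBad : List Bool → Bool
  | a :: b :: c :: rest => (a == b && b == c) || tripleBad (b :: c :: rest)
  | _ => false

-- any(x == y and x not in 'eo' for x, y in zip(password, password[1:]))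
def pairBad : List Char → Bool
  | x :: y :: rest => (x == y && !("eo".toList.contains x)) || pairBad (y :: rest)
  | _ => false

def accept_condition_alt (password : String) : Bool :=
  let cls := password.toList.map isVowel
  if tripleBad cls then false
  else if pairBad password.toList then false
  else cls.any id

-- ===== PRECONDITION & SPEC =====
def Spec_accept_condition (password : String) (out : Bool) : Prop := out = accept_condition_alt password
instance (password : String) (out : Bool) : Decidable (Spec_accept_condition password out) := by unfold Spec_accept_condition; infer_instance

-- ===== CLAIM (what is proved, stated in full; the proofs are below) =====
def Claim_equal_accept_condition : Prop := ∀ (password : String), Dom_accept_condition password → Spec_accept_condition password (accept_condition password)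

-- ===== LEMMAS AND PROOFS =====

-- the run counters of A determined by the previous two characters (when no early return fired)
def vcnt2 (q p : Char) : Nat := if isVowel p then (if isVowel q then 2 else 1) else 0
def ccnt2 (q p : Char) : Nat := if isVowel p then 0 else (if isVowel q then 1 else 2)

theorem ite2 (X Y z : Bool) :
    (if X = true then false else if Y = true then false else z) = (!X && !Y && z) := by
  cases X <;> cases Y <;> simp

theorem loopA_two (rest : List Char) : ∀ (q p : Char) (hv : Bool),
    loopA rest hv (vcnt2 q p) (ccnt2 q p) (some p)
      = if tripleBad (isVowel q :: isVowel p :: rest.map isVowel) then false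
        else if pairBad (p :: rest) then false
        else hv || (rest.map isVowel).any id := by
  induction rest with
  | nil =>
    intro q p hv
    simp [loopA, tripleBad, pairBad]
  | cons ch rest ih =>
    intro q p hv
    by_cases hq : isVowel q = true <;> by_cases hp : isVowel p = true <;>
      by_cases hc : isVowel ch = true <;>
      simp [loopA, vcnt2, ccnt2, hq, hp, hc, tripleBad, pairBad] <;>
      by_cases he : p = ch ∧ ¬ (['e', 'o'].contains ch = true)
    all_goals try (obtain ⟨rfl, hne⟩ := he; simp at hne; simp [hne])
    all_goals (
      have hpe : (!decide (p = ch) || (decide (p = 'e') || decide (p = 'o')))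
               = (!decide (p = ch) || (decide (ch = 'e') || decide (ch = 'o'))) := by
        by_cases hpc : p = ch
        · subst hpc; rfl
        · simp [hpc]
      rw [hpe]
      first
        | (have H := ih p ch true;  simp [vcnt2, ccnt2, hp, hc, ite2] at H; rw [H])
        | (have H := ih p ch hv;    simp [vcnt2, ccnt2, hp, hc, ite2] at H; rw [H])
      simp [Bool.and_assoc, Bool.and_left_comm, Bool.and_comm])

theorem loopA_one (rest : List Char) (p : Char) (hv : Bool) :
    loopA rest hv (if isVowel p then 1 else 0) (if isVowel p then 0 else 1) (some p)
      = if tripleBad (isVowel p :: rest.map isVowel) then false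
        else if pairBad (p :: rest) then false
        else hv || (rest.map isVowel).any id := by
  cases rest with
  | nil => by_cases hp : isVowel p = true <;> simp [loopA, hp, tripleBad, pairBad]
  | cons ch rest =>
    by_cases hp : isVowel p = true <;> by_cases hc : isVowel ch = true <;>
      simp [loopA, hp, hc, pairBad] <;>
      by_cases he : p = ch ∧ ¬ (['e', 'o'].contains ch = true)
    all_goals try (obtain ⟨rfl, hne⟩ := he; simp at hne; simp [hne, tripleBad])
    all_goals (
      have hpe : (!decide (p = ch) || (decide (p = 'e') || decide (p = 'o')))
               = (!decide (p = ch) || (decide (ch = 'e') || decide (ch = 'o'))) := by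
        by_cases hpc : p = ch
        · subst hpc; rfl
        · simp [hpc]
      rw [hpe]
      first
        | (have H := loopA_two rest p ch true;  simp [vcnt2, ccnt2, hp, hc, ite2] at H; rw [H])
        | (have H := loopA_two rest p ch hv;    simp [vcnt2, ccnt2, hp, hc, ite2] at H; rw [H])
      simp [tripleBad, hp, hc, Bool.and_assoc, Bool.and_left_comm, Bool.and_comm])

-- ===== VERDICT (by name: the statement is the Claim_ definition above) =====
theorem accept_condition_spec : Claim_equal_accept_condition := by
  intro password _
  unfold Spec_accept_condition accept_condition accept_condition_alt
  cases h : password.toList with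
  | nil => simp [loopA, tripleBad, pairBad]
  | cons ch rest =>
    have H := loopA_one rest ch (isVowel ch)
    by_cases hc : isVowel ch = true <;>
      simp [hc, ite2] at H <;>
      simp [loopA, hc, ite2, H, Bool.and_assoc, Bool.and_left_comm, Bool.and_comm]
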